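-- pv_equiv track=rewrite | github.com/blzzua/codewars | 7-kyu/encode_data_on_cd_compact_disc_surface.py | encode_cd
-- ===== SOURCE A (Python) =====
-- def encode_cd(n):
--     bitmask = f'{n:b}'.zfill(8)[::-1]
--     res = 'P'
--     prev = res
--     for x in bitmask:
--         if x == '0':
--             res+=prev
--         else:
--             if prev == 'P':
--                 res+='L'
--             else:
--                 res+='P'
--         prev = res[-1]
--     return res
-- ===== SOURCE B (Python) =====
-- def encode_cd(n):
--     # Stateless formulation: the i-th output level depends only on the parity
--     # of the number of flip characters (non-'0') among the first i bits, so
--     # each character is computed independently from a prefix count — no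
--     # running state at all.
--     bits = format(n, 'b').zfill(8)[::-1]
--     return ''.join('PL'[(i - bits[:i].count('0')) % 2] for i in range(len(bits) + 1))
-- ===== Notes on version B (the rewrite author's own statement) =====
-- stated objective: alternative
-- what changed: Replaces A's stateful loop (growing the result string and re-reading its last character each step) with a stateless per-position formula: each output character is computed independently as 'PL' indexed by the parity of the non-'0' count in the bit-string prefix of that length.
import Mathlib
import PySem

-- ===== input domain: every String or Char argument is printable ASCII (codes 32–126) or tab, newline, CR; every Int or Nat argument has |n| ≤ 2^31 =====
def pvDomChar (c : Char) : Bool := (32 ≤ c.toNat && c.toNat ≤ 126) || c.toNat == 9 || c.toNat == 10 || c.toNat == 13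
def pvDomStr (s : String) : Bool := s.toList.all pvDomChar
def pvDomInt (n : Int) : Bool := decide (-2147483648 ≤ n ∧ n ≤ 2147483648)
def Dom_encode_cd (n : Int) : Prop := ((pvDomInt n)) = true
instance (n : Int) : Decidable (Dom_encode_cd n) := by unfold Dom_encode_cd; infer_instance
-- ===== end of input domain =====

-- B replaces A's stateful loop by a stateless per-position prefix-count formula
-- (objective: alternative; same exact output).

-- ===== PORT A =====
-- one loop step of A: append to res, then prev = res[-1]
def pvStepA (st : List Char × Char) (x : Char) : List Char × Char :=
  let res := st.1
  let prev := st.2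
  let res' :=
    if x = '0' then res ++ [prev]
    else if prev = 'P' then res ++ ['L'] else res ++ ['P']
  -- prev = res[-1]; res' is always nonempty, so the .getD default is never used
  (res', (PySem.List.pyGet? res' (-1)).getD 'P')

def encode_cd (n : Int) : String :=
  -- bitmask = f'{n:b}'.zfill(8)[::-1]  (slice? [::-1]; step -1 never raises)
  let bitmask := (PySem.List.slice? (PySem.Chars.zfill (PySem.Int.toBinChars n) 8) none none (-1)).getD []
  let st := bitmask.foldl pvStepA (['P'], 'P')
  String.ofList st.1

-- ===== PORT B =====
def encode_cd_alt (n : Int) : String :=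
  -- bits = format(n, 'b').zfill(8)[::-1]
  let bits := (PySem.List.slice? (PySem.Chars.zfill (PySem.Int.toBinChars n) 8) none none (-1)).getD []
  -- ''.join('PL'[(i - bits[:i].count('0')) % 2] for i in range(len(bits) + 1))
  -- 'PL'[j] with j ∈ {0,1} never raises, so the total pyGetD is exact here
  String.ofList ((PySem.List.pyRange 0 ((bits.length : Int) + 1) 1).map (fun i =>
    PySem.List.pyGetD ['P', 'L']
      (PySem.Int.mod (i - ((PySem.List.slice bits none (some i)).count '0' : Int)) 2) 'P'))

-- ===== PRECONDITION & SPEC =====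
def Spec_encode_cd (n : Int) (out : String) : Prop := out = encode_cd_alt n
instance (n : Int) (out : String) : Decidable (Spec_encode_cd n out) := by unfold Spec_encode_cd; infer_instance

-- ===== CLAIM (what is proved, stated in full; the proofs are below) =====
def Claim_equal_encode_cd : Prop := ∀ (n : Int), Dom_encode_cd n → Spec_encode_cd n (encode_cd n)

-- ===== LEMMAS AND PROOFS =====
-- the level character a parity denotes
def pvCh (p : Bool) : Char := if p then 'L' else 'P'

theorem pvCh_false : pvCh false = 'P' := rfl

-- parity of the number of flip characters (non-'0') in a list
def pvPar (l : List Char) : Bool := l.countP (fun x => decide (x ≠ '0')) % 2 == 1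

theorem pvPar_nil : pvPar [] = false := by decide

theorem pvPar_cons (x : Char) (t : List Char) :
    pvPar (x :: t) = xor (decide (x ≠ '0')) (pvPar t) := by
  simp only [pvPar, List.countP_cons]
  cases hd : decide (x ≠ '0') with
  | false => simp
  | true =>
    generalize List.countP (fun x => decide (x ≠ '0')) t = c
    rcases Nat.mod_two_eq_zero_or_one c with h | h <;>
      simp [Nat.add_mod, h]

-- one step of A from a state whose prev is pvCh p
theorem pvStepA_ch (p : Bool) (res : List Char) (x : Char) :
    pvStepA (res, pvCh p) x =
      (res ++ [pvCh (xor p (decide (x ≠ '0')))], pvCh (xor p (decide (x ≠ '0')))) := by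
  by_cases hx : x = '0' <;> cases p <;>
    simp [pvStepA, pvCh, hx, PySem.List.pyGet?_neg_one_append_singleton]

-- main invariant for A's loop: the result is res ++ the per-prefix parity characters
theorem pvMainA (l : List Char) (res : List Char) (p : Bool) :
    l.foldl pvStepA (res, pvCh p) =
      (res ++ (List.range l.length).map (fun k => pvCh (xor p (pvPar (l.take (k + 1))))),
       pvCh (xor p (pvPar l))) := by
  induction l generalizing res p with
  | nil => simp [pvPar_nil]
  | cons x l ih =>
    simp only [List.foldl_cons, pvStepA_ch]
    rw [ih]
    simp only [List.length_cons, List.range_succ_eq_map, List.map_cons, List.map_map,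
      Prod.mk.injEq]
    refine ⟨?_, by simp [pvPar_cons]⟩
    simp only [List.append_assoc, List.singleton_append]
    congr 1
    congr 1
    · simp [List.take_succ_cons, pvPar_cons, pvPar_nil]
    · refine List.map_congr_left (fun k _ => ?_)
      simp [Function.comp, List.take_succ_cons, pvPar_cons]

-- A's loop from the real initial state, as a per-prefix map
theorem pvMainA' (l : List Char) :
    l.foldl pvStepA (['P'], 'P') =
      (['P'] ++ (List.range l.length).map (fun k => pvCh (pvPar (l.take (k + 1)))),
       pvCh (pvPar l)) := by
  have h := pvMainA l ['P'] false
  simpa [pvCh_false] using h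

-- B's per-position formula at a natural index k ≤ len equals the parity character
theorem pvB_all (bits : List Char) (k : Nat) (hk : k ≤ bits.length) :
    PySem.List.pyGetD ['P', 'L']
      (PySem.Int.mod ((k : Int) - ((PySem.List.slice bits none (some (k : Int))).count '0' : Int)) 2) 'P'
      = pvCh (pvPar (bits.take k)) := by
  rw [PySem.List.slice_to_natCast]
  set t := bits.take k with ht
  have hlen : t.length = k := by rw [ht]; simp [List.length_take]; omega
  have hsplit : t.count '0' + t.countP (fun x => decide (x ≠ '0')) = t.length := by
    have h2 := List.length_eq_countP_add_countP (p := fun x : Char => x == '0') (l := t)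
    have hc : t.count '0' = t.countP (fun x => x == '0') := by simp [List.count_eq_countP]
    have hn : t.countP (fun x => decide (x ≠ '0'))
        = t.countP (fun a => decide (¬(a == '0') = true)) :=
      List.countP_congr (by intro x _; simp)
    omega
  have heq : (k : Int) - (t.count '0' : Int) = ((t.countP (fun x => decide (x ≠ '0'))) : Int) := by
    omega
  rw [heq, PySem.Int.mod_eq_emod_of_pos (by norm_num),
    show ((t.countP (fun x => decide (x ≠ '0')) : Int)) % 2
      = ((t.countP (fun x => decide (x ≠ '0')) % 2 : Nat) : Int) from by omega,
    PySem.List.pyGetD_natCast]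
  simp only [pvPar, pvCh]
  obtain ⟨c, hc⟩ : ∃ c, List.countP (fun x => decide (x ≠ '0')) t = c := ⟨_, rfl⟩
  simp only [hc]
  rcases Nat.mod_two_eq_zero_or_one c with h | h <;> simp [h, List.getD]

-- ===== VERDICT (by name: the statement is the Claim_ definition above) =====
theorem encode_cd_spec : Claim_equal_encode_cd := by
  intro n _
  unfold Spec_encode_cd encode_cd encode_cd_alt
  dsimp only
  set bits := (PySem.List.slice? (PySem.Chars.zfill (PySem.Int.toBinChars n) 8) none none (-1)).getD [] with hb
  rw [pvMainA']
  dsimp only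
  congr 1
  have hAlist : ('P' :: (List.range bits.length).map (fun k => pvCh (pvPar (bits.take (k + 1)))))
      = (List.range (bits.length + 1)).map (fun k => pvCh (pvPar (bits.take k))) := by
    rw [List.range_succ_eq_map, List.map_cons, List.map_map]
    simp [pvPar_nil, pvCh_false, Function.comp]
  rw [List.singleton_append, hAlist, PySem.List.pyRange_one,
    show ((bits.length : Int) + 1 - 0).toNat = bits.length + 1 from by omega, List.map_map]
  refine List.map_congr_left (fun k hk => ?_)
  have hk' : k ≤ bits.length := by
    have := List.mem_range.mp hk; omega
  simp only [Function.comp_apply, zero_add]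
  exact (pvB_all bits k hk').symm
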